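-- pv_equiv track=rewrite | github.com/miaortizma/competitive-programming | foobar/free-the-bunny-prisoners/sol.py | solution
-- ===== SOURCE A (Python) =====
-- def solution(num_buns, num_required):
--   if num_required == 0:
--     return [[] for i in range(num_buns)]
--   if num_required == 1:
--     return [[0] for i in range(num_buns)]
--   if num_buns == num_required:
--     return [[i] for i in range(num_buns)]
--   if num_required == 2:
--     keys = list(range(num_buns))
--     sol = []
--     for i in range(num_buns):
--       j = num_buns - 1 - i
--       sol.append(keys[:j] + keys[j + 1:])
--     return sol
--   left = solution(num_buns - 1, num_required)
--   right = solution(num_buns - 1, num_required - 1)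
--   num_keys_left = max([max(i) for i in left]) + 1
--   keys_per_bun = len(left[0]) + len(right[0])
--   sol = []
--   sol.append(list(range(keys_per_bun)))
--   for i in range(num_buns - 1):
--     left_i = left[i]
--     right_i = right[i]
--     right_i = [ j + num_keys_left for j in right_i]
--     sol.append(left_i + right_i)
--   return sol
-- ===== SOURCE B (Python) =====
-- def _row2(n):
--     keys = list(range(n))
--     return [keys[:n - 1 - i] + keys[n - i:] for i in range(n)]
--
--
-- def _merge(left, right):
--     num_keys_left = max(max(l) for l in left) + 1
--     keys_per_bun = len(left[0]) + len(right[0])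
--     return [list(range(keys_per_bun))] + [
--         l + [j + num_keys_left for j in r] for l, r in zip(left, right)
--     ]
--
--
-- def solution(num_buns, num_required):
--     if num_required == 0:
--         return [[] for _ in range(num_buns)]
--     if num_required == 1:
--         return [[0] for _ in range(num_buns)]
--     if num_buns == num_required:
--         return [[i] for i in range(num_buns)]
--     if num_required == 2:
--         return _row2(num_buns)
--     # bottom-up table: prev[k] = answer for (k + r - 1, r - 1), r the current row
--     prev = [[[0], [1]]] + [_row2(n) for n in range(3, num_buns + 1)]
--     for r in range(3, num_required + 1):
--         cur = [[[i] for i in range(r)]]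
--         for p in prev[1:num_buns - r + 1]:
--             cur.append(_merge(cur[-1], p))
--         prev = cur
--     return prev[-1]
-- ===== Notes on version B (the rewrite author's own statement) =====
-- stated objective: faster
-- what changed: Replaces A's naive top-down recursion (which re-solves the same (n,r) subproblems exponentially often) by a bottom-up dynamic-programming table: one row of solutions per num_required value, each row built left-to-right from the previous row, plus zip instead of index loops in the merge.
import Mathlib
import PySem

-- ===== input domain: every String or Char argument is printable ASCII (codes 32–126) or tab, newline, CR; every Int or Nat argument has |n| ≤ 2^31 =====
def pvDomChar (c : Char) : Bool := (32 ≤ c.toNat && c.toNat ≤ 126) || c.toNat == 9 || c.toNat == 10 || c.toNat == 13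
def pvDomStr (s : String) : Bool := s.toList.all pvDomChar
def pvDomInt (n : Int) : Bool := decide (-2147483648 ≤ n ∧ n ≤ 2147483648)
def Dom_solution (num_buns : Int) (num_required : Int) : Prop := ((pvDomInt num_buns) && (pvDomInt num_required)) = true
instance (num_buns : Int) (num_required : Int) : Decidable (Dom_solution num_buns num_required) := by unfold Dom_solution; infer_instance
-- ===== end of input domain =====

-- B builds the answer bottom-up, one dynamic-programming row per num_required value, instead of A's top-down recursion that re-solves shared (n, r) subproblems; equality of return values is proved on Pre_ (the inputs where Python A terminates).

-- ===== PORT A =====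
-- literal port of A; 'fuel' only makes the (possibly non-terminating) Python recursion total:
-- fuel 0 is never reached on inputs satisfying Pre_solution. Python's max([])/x[i] raise where
-- the '.getD' defaults sit; those defaults are unreachable on Pre_solution.
def solA : Nat → Int → Int → List (List Int)
  | 0, _, _ => []
  | fuel+1, num_buns, num_required =>
    if num_required = 0 then (PySem.List.pyRange 0 num_buns 1).map (fun _ => ([] : List Int))
    else if num_required = 1 then (PySem.List.pyRange 0 num_buns 1).map (fun _ => [(0 : Int)])
    else if num_buns = num_required then (PySem.List.pyRange 0 num_buns 1).map (fun i => [i])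
    else if num_required = 2 then
      let keys := PySem.List.pyRange 0 num_buns 1
      (PySem.List.pyRange 0 num_buns 1).foldl (fun sol i =>
        let j := num_buns - 1 - i
        sol ++ [PySem.List.slice keys none (some j) ++ PySem.List.slice keys (some (j + 1)) none]) []
    else
      let left := solA fuel (num_buns - 1) num_required
      let right := solA fuel (num_buns - 1) (num_required - 1)
      let num_keys_left :=
        ((PySem.List.max? (left.map (fun l => (PySem.List.max? l (fun y => y)).getD 0)) (fun y => y)).getD 0) + 1
      let keys_per_bun : Int :=
        (((PySem.List.pyGet? left 0).getD []).length : Int) + (((PySem.List.pyGet? right 0).getD []).length : Int)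
      (PySem.List.pyRange 0 (num_buns - 1) 1).foldl (fun sol i =>
        let left_i := (PySem.List.pyGet? left i).getD []
        let right_i := (PySem.List.pyGet? right i).getD []
        let right_i := right_i.map (fun j => j + num_keys_left)
        sol ++ [left_i ++ right_i]) [PySem.List.pyRange 0 keys_per_bun 1]

def solution (num_buns : Int) (num_required : Int) : List (List Int) :=
  solA (num_buns.toNat + 1) num_buns num_required

-- ===== PORT B =====
def row2B (n : Int) : List (List Int) :=
  let keys := PySem.List.pyRange 0 n 1
  (PySem.List.pyRange 0 n 1).map (fun i =>
    PySem.List.slice keys none (some (n - 1 - i)) ++ PySem.List.slice keys (some (n - i)) none)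

def mergeB (left right : List (List Int)) : List (List Int) :=
  let num_keys_left :=
    ((PySem.List.max? (left.map (fun l => (PySem.List.max? l (fun y => y)).getD 0)) (fun y => y)).getD 0) + 1
  let keys_per_bun : Int :=
    (((PySem.List.pyGet? left 0).getD []).length : Int) + (((PySem.List.pyGet? right 0).getD []).length : Int)
  PySem.List.pyRange 0 keys_per_bun 1 ::
    (left.zip right).map (fun lr => lr.1 ++ lr.2.map (fun j => j + num_keys_left))

def solution_alt (num_buns : Int) (num_required : Int) : List (List Int) :=
  if num_required = 0 then (PySem.List.pyRange 0 num_buns 1).map (fun _ => ([] : List Int))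
  else if num_required = 1 then (PySem.List.pyRange 0 num_buns 1).map (fun _ => [(0 : Int)])
  else if num_buns = num_required then (PySem.List.pyRange 0 num_buns 1).map (fun i => [i])
  else if num_required = 2 then row2B num_buns
  else
    let prev0 := [[(0 : Int)], [1]] :: (PySem.List.pyRange 3 (num_buns + 1) 1).map row2B
    let prev := (PySem.List.pyRange 3 (num_required + 1) 1).foldl (fun prev r =>
      (PySem.List.slice prev (some 1) (some (num_buns - r + 1))).foldl (fun cur p =>
        cur ++ [mergeB ((PySem.List.pyGet? cur (-1)).getD []) p])
        [(PySem.List.pyRange 0 r 1).map (fun i => [i])]) prev0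
    (PySem.List.pyGet? prev (-1)).getD []

-- ===== PRECONDITION & SPEC =====
-- Pre_ is exactly where Python A terminates: otherwise its recursion never bottoms out (RecursionError).
def Pre_solution (num_buns : Int) (num_required : Int) : Prop :=
  num_required = 0 ∨ num_required = 1 ∨ num_required = 2 ∨ num_buns = num_required ∨
    (3 ≤ num_required ∧ num_required ≤ num_buns)
instance (num_buns : Int) (num_required : Int) : Decidable (Pre_solution num_buns num_required) := by
  unfold Pre_solution; infer_instance

def pvWitness_solution : Int × Int := (5, 3)

def Spec_solution (num_buns : Int) (num_required : Int) (out : List (List Int)) : Prop := out = solution_alt num_buns num_required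
instance (num_buns : Int) (num_required : Int) (out : List (List Int)) : Decidable (Spec_solution num_buns num_required out) := by unfold Spec_solution; infer_instance

-- ===== CLAIM (what is proved, stated in full; the proofs are below) =====
def Claim_equal_solution : Prop := ∀ (num_buns : Int) (num_required : Int), Dom_solution num_buns num_required → Pre_solution num_buns num_required → Spec_solution num_buns num_required (solution num_buns num_required)

-- ===== LEMMAS AND PROOFS =====

-- the common mathematical recurrence both programs compute on the admitted region
def S (num_buns : Int) (num_required : Int) : List (List Int) :=
  if num_required = 0 then (PySem.List.pyRange 0 num_buns 1).map (fun _ => ([] : List Int))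
  else if num_required = 1 then (PySem.List.pyRange 0 num_buns 1).map (fun _ => [(0 : Int)])
  else if num_buns = num_required then (PySem.List.pyRange 0 num_buns 1).map (fun i => [i])
  else if num_required = 2 then row2B num_buns
  else if num_buns < num_required ∨ num_required < 3 then []
  else mergeB (S (num_buns - 1) num_required) (S (num_buns - 1) (num_required - 1))
termination_by num_buns.toNat
decreasing_by all_goals omega

lemma length_S : ∀ (k : Nat) (n r : Int), n.toNat ≤ k → 2 ≤ r → r ≤ n → (S n r).length = n.toNat := by
  intro k
  induction k with
  | zero => intro n r h h2 hle; omega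
  | succ k ih =>
    intro n r hf h2 hle
    rw [S]
    rw [if_neg (by omega : ¬ r = 0), if_neg (by omega : ¬ r = 1)]
    by_cases heq : n = r
    · rw [if_pos heq]; simp [PySem.List.length_pyRange_one]
    rw [if_neg heq]
    by_cases hr2 : r = 2
    · rw [if_pos hr2]; simp [row2B, PySem.List.length_pyRange_one]
    rw [if_neg hr2, if_neg (by omega : ¬ (n < r ∨ r < 3))]
    have hl := ih (n-1) r (by omega) (by omega) (by omega)
    have hr := ih (n-1) (r-1) (by omega) (by omega) (by omega)
    simp [mergeB, List.length_zip, hl, hr]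
    omega

lemma zip_index (L R : List (List Int)) (f : List Int → List Int → List Int) (h : L.length = R.length) :
    (PySem.List.pyRange 0 (L.length : Int) 1).map
      (fun i => f ((PySem.List.pyGet? L i).getD []) ((PySem.List.pyGet? R i).getD []))
      = (L.zip R).map (fun lr => f lr.1 lr.2) := by
  apply List.ext_getElem
  · simp [PySem.List.length_pyRange_one, h]
  · intro k h1 h2
    have hk : k < L.length := by simpa [PySem.List.length_pyRange_one] using h1
    have hk' : k < R.length := by omega
    simp [PySem.List.getElem_pyRange_one, List.getElem_zip,
      List.getElem?_eq_getElem hk, List.getElem?_eq_getElem hk']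

lemma S_diag (r : Int) (h0 : ¬ r = 0) (h1 : ¬ r = 1) :
    S r r = (PySem.List.pyRange 0 r 1).map (fun i => [i]) := by
  rw [S, if_neg h0, if_neg h1, if_pos rfl]

lemma S_step (n r : Int) (h3 : 3 ≤ r) (hlt : r < n) :
    S n r = mergeB (S (n-1) r) (S (n-1) (r-1)) := by
  rw [S, if_neg (by omega : ¬ r = 0), if_neg (by omega : ¬ r = 1),
    if_neg (by omega : ¬ n = r), if_neg (by omega : ¬ r = 2),
    if_neg (by omega : ¬ (n < r ∨ r < 3))]

lemma S_row2 (n : Int) (h : ¬ n = 2) : S n 2 = row2B n := by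
  rw [S, if_neg (by omega : ¬ (2:Int) = 0), if_neg (by omega : ¬ (2:Int) = 1), if_neg h, if_pos rfl]

lemma solA_eq_S : ∀ (fuel : Nat) (n r : Int), 2 ≤ r → r ≤ n → n.toNat ≤ fuel →
    solA fuel n r = S n r := by
  intro fuel
  induction fuel with
  | zero => intro n r h2 hle hf; omega
  | succ fuel ih =>
    intro n r h2 hle hf
    simp only [solA]
    rw [if_neg (by omega : ¬ r = 0), if_neg (by omega : ¬ r = 1)]
    by_cases heq : n = r
    · rw [if_pos heq, heq, S_diag r (by omega) (by omega)]
    rw [if_neg heq]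
    by_cases hr2 : r = 2
    · rw [if_pos hr2, hr2, S_row2 n (by omega)]
      rw [PySem.List.foldl_append_singleton_eq_map
        (fun i => PySem.List.slice (PySem.List.pyRange 0 n 1) none (some (n - 1 - i)) ++
          PySem.List.slice (PySem.List.pyRange 0 n 1) (some (n - 1 - i + 1)) none) _ []]
      rw [List.nil_append, row2B]
      have harg : ∀ i : Int, n - 1 - i + 1 = n - i := by intro i; ring
      simp only [harg]
    rw [if_neg hr2, S_step n r (by omega) (by omega)]
    have hL := ih (n-1) r (by omega) (by omega) (by omega)
    have hR := ih (n-1) (r-1) (by omega) (by omega) (by omega)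
    rw [hL, hR, mergeB]
    set L := S (n-1) r with hLdef
    set R := S (n-1) (r-1) with hRdef
    have hlenL : L.length = (n-1).toNat := length_S (n-1).toNat (n-1) r (le_refl _) (by omega) (by omega)
    have hlenR : R.length = (n-1).toNat := length_S (n-1).toNat (n-1) (r-1) (le_refl _) (by omega) (by omega)
    set nkl := ((PySem.List.max? (L.map (fun l => (PySem.List.max? l (fun y => y)).getD 0)) (fun y => y)).getD 0) + 1 with hnkl
    rw [PySem.List.foldl_append_singleton_eq_map
      (fun i => (PySem.List.pyGet? L i).getD [] ++ ((PySem.List.pyGet? R i).getD []).map (fun j => j + nkl)) _ _]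
    rw [show (n - 1 : Int) = (L.length : Int) by omega]
    rw [zip_index L R (fun l r => l ++ r.map (fun j => j + nkl)) (by omega)]
    simp only [List.singleton_append]

lemma prev0_eq (m : Int) (hm : 3 ≤ m) :
    ([[(0:Int)],[1]] : List (List Int)) :: (PySem.List.pyRange 3 (m+1) 1).map row2B
      = (PySem.List.pyRange 2 (m+1) 1).map (fun n => S n 2) := by
  rw [PySem.List.pyRange_one_cons (by omega : (2:Int) < m+1)]
  rw [List.map_cons]
  congr 1
  · rw [S]; decide
  · apply List.map_congr_left
    intro x hx
    rw [PySem.List.mem_pyRange_one] at hx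
    rw [S, if_neg (by omega : ¬ (2:Int) = 0), if_neg (by omega : ¬ (2:Int) = 1),
      if_neg (by omega : ¬ x = 2), if_pos rfl]

lemma slice_row (m r : Int) (g : Int → List (List Int)) (_h1 : 3 ≤ r) (h2 : r ≤ m) :
    PySem.List.slice ((PySem.List.pyRange (r-1) (m+1) 1).map g) (some 1) (some (m - r + 1))
      = (PySem.List.pyRange r m 1).map g := by
  rw [PySem.List.slice_toNat _ (by omega) (by omega)]
  rw [PySem.List.pyRange_one_cons (by omega : r-1 < m+1), List.map_cons]
  rw [show (r - 1 + 1 : Int) = r by ring]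
  rw [show ((1:Int)).toNat = 1 by decide]
  rw [List.drop_succ_cons, List.drop_zero]
  rw [PySem.List.pyRange_one_append r m (m+1) (by omega) (by omega), List.map_append]
  have hlen : ((PySem.List.pyRange r m 1).map g).length = (m - r + 1).toNat - 1 := by
    simp [PySem.List.length_pyRange_one]; omega
  rw [← hlen, List.take_left]

lemma inner_fold (r : Int) (h3 : 3 ≤ r) : ∀ (j : Nat),
    (List.foldl (fun cur p => cur ++ [mergeB ((PySem.List.pyGet? cur (-1)).getD []) p])
      [(PySem.List.pyRange 0 r 1).map (fun i => [i])]
      ((PySem.List.pyRange r (r + (j:Int)) 1).map (fun n => S n (r-1))))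
      = (PySem.List.pyRange r (r + (j:Int) + 1) 1).map (fun n => S n r) := by
  intro j
  induction j with
  | zero =>
    simp only [Nat.cast_zero, add_zero]
    rw [PySem.List.pyRange_one_eq_nil (le_refl r)]
    rw [PySem.List.pyRange_one_succ_right (le_refl r), PySem.List.pyRange_one_eq_nil (le_refl r)]
    simp only [List.map_nil, List.foldl_nil, List.nil_append, List.map_cons]
    rw [S_diag r (by omega) (by omega)]
  | succ j ih =>
    rw [show (r + ((j+1:Nat):Int)) = (r + (j:Int)) + 1 by push_cast; ring]
    rw [PySem.List.pyRange_one_succ_right (by omega : r ≤ r + (j:Int)), List.map_append,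
      List.foldl_append, ih]
    simp only [List.map_cons, List.map_nil, List.foldl_cons, List.foldl_nil]
    rw [PySem.List.pyGet?_neg_one]
    rw [PySem.List.pyRange_one_succ_right (by omega : r ≤ r + (j:Int)), List.map_append]
    simp only [List.map_cons, List.map_nil]
    rw [List.getLast?_concat]
    simp only [Option.getD_some]
    rw [PySem.List.pyRange_one_succ_right (by omega : r ≤ r + (j:Int) + 1), List.map_append]
    rw [PySem.List.pyRange_one_succ_right (by omega : r ≤ r + (j:Int)), List.map_append]
    simp only [List.map_cons, List.map_nil]
    congr 1
    congr 1
    rw [S_step (r + (j:Int) + 1) r h3 (by omega)]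
    rw [show (r + (j:Int) + 1 - 1) = r + (j:Int) by ring]

lemma outer_step (m r : Int) (h3 : 3 ≤ r) (hrm : r ≤ m) :
    (PySem.List.slice ((PySem.List.pyRange (r-1) (m+1) 1).map (fun n => S n (r-1))) (some 1)
        (some (m - r + 1))).foldl
        (fun cur p => cur ++ [mergeB ((PySem.List.pyGet? cur (-1)).getD []) p])
        [(PySem.List.pyRange 0 r 1).map (fun i => [i])]
      = (PySem.List.pyRange r (m+1) 1).map (fun n => S n r) := by
  rw [slice_row m r _ h3 hrm]
  have h := inner_fold r h3 (m - r).toNat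
  rw [show (r + (((m-r).toNat):Int)) = m by omega] at h
  rw [show (m + 1 : Int) = m + 1 by ring] at h
  exact h

lemma outer_fold (m : Int) : ∀ (j : Nat), 3 + (j:Int) ≤ m →
    List.foldl (fun prev r =>
        (PySem.List.slice prev (some 1) (some (m - r + 1))).foldl
          (fun cur p => cur ++ [mergeB ((PySem.List.pyGet? cur (-1)).getD []) p])
          [(PySem.List.pyRange 0 r 1).map (fun i => [i])])
      ((PySem.List.pyRange 2 (m+1) 1).map (fun n => S n 2))
      (PySem.List.pyRange 3 (3 + (j:Int) + 1) 1)
      = (PySem.List.pyRange (3 + (j:Int)) (m+1) 1).map (fun n => S n (3 + (j:Int))) := by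
  intro j
  induction j with
  | zero =>
    intro hj
    rw [show ((3:Int) + ((0:Nat):Int) + 1) = 3 + 1 by norm_num]
    rw [PySem.List.pyRange_one_succ_right (by omega : (3:Int) ≤ 3),
      PySem.List.pyRange_one_eq_nil (le_refl (3:Int))]
    simp only [List.nil_append, List.foldl_cons, List.foldl_nil]
    have h := outer_step m 3 (by norm_num) (by omega)
    rw [show ((3:Int) - 1) = 2 by norm_num] at h
    rw [show ((3:Int) + ((0:Nat):Int)) = 3 by norm_num]
    exact h
  | succ j ih =>
    intro hj
    rw [show ((3:Int) + ((j+1:Nat):Int) + 1) = (3 + (j:Int) + 1) + 1 by push_cast; ring]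
    rw [PySem.List.pyRange_one_succ_right (by omega : (3:Int) ≤ 3 + (j:Int) + 1),
      List.foldl_append, ih (by omega)]
    simp only [List.foldl_cons, List.foldl_nil]
    have h := outer_step m (3 + (j:Int) + 1) (by omega) (by omega)
    rw [show ((3:Int) + (j:Int) + 1 - 1) = 3 + (j:Int) by ring] at h
    rw [h]
    rw [show ((3:Int) + ((j+1:Nat):Int)) = 3 + (j:Int) + 1 by push_cast; ring]

lemma alt_eq_S (n r : Int) (h3 : 3 ≤ r) (hlt : r < n) : solution_alt n r = S n r := by
  rw [solution_alt]
  rw [if_neg (by omega : ¬ r = 0), if_neg (by omega : ¬ r = 1),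
    if_neg (by omega : ¬ n = r), if_neg (by omega : ¬ r = 2)]
  simp only []
  rw [prev0_eq n (by omega)]
  have h := outer_fold n (r - 3).toNat (by omega)
  rw [show ((3:Int) + (((r-3).toNat):Int)) = r by omega] at h
  rw [h]
  rw [PySem.List.pyRange_one_succ_right (by omega : r ≤ n), List.map_append,
    PySem.List.pyGet?_neg_one]
  simp only [List.map_cons, List.map_nil]
  rw [List.getLast?_concat]
  rfl

theorem solution_spec : Claim_equal_solution := by
  unfold Claim_equal_solution
  intro n r _ hpre
  unfold Spec_solution solution
  by_cases h0 : r = 0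
  · simp only [solA, solution_alt]
    rw [if_pos h0, if_pos h0]
  by_cases h1 : r = 1
  · simp only [solA, solution_alt]
    rw [if_neg h0, if_pos h1, if_neg h0, if_pos h1]
  by_cases heq : n = r
  · simp only [solA, solution_alt]
    rw [if_neg h0, if_neg h1, if_pos heq, if_neg h0, if_neg h1, if_pos heq]
  by_cases h2 : r = 2
  · -- both reduce to row2B-shaped maps, for every n (negative n gives empty ranges)
    simp only [solA, solution_alt]
    rw [if_neg h0, if_neg h1, if_neg heq, if_pos h2,
      if_neg h0, if_neg h1, if_neg heq, if_pos h2]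
    rw [PySem.List.foldl_append_singleton_eq_map
      (fun i => PySem.List.slice (PySem.List.pyRange 0 n 1) none (some (n - 1 - i)) ++
        PySem.List.slice (PySem.List.pyRange 0 n 1) (some (n - 1 - i + 1)) none) _ []]
    rw [List.nil_append, row2B]
    have harg : ∀ i : Int, n - 1 - i + 1 = n - i := by intro i; ring
    simp only [harg]
  -- remaining: 3 ≤ r ≤ n, r ≠ n
  have h3 : 3 ≤ r := by rcases hpre with h|h|h|h|h <;> omega
  have hlt : r < n := by rcases hpre with h|h|h|h|h <;> omega
  rw [solA_eq_S (n.toNat + 1) n r (by omega) (by omega) (by omega)]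
  rw [alt_eq_S n r h3 hlt]
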